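-- pv_equiv track=rewrite | github.com/Wpawlina/AGH-DSA-Course | kolokwia/moje/kolos1/test1.py | maxrank
-- ===== SOURCE A (Python) =====
-- def maxrank(T):
--   n=len(T)
--   maxrank=-1
--   ranks=[0]*n
--   for i in range(1,n):
--     currank=0
--     for j in range(i-1,-1,-1):# sprawdzanie elementów znajdujacych sie przed sprawdzanym elementem
--       if T[j]<T[i]:
--         currank+=1
--       if T[j]>T[i] and ranks[j]>=maxrank:
--           break
--     if currank>maxrank: #znajdowanie najwyzszej rangi
--         maxrank=currank
--
--   return maxrank
-- ===== SOURCE B (Python) =====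
-- def maxrank(T):
--     if not T:
--         return -1
--     best = -1
--     pre = [T[0]]  # sorted copy of the elements seen so far
--     for x in T[1:]:
--         lo, hi = 0, len(pre)
--         while lo < hi:
--             mid = (lo + hi) // 2
--             if pre[mid] < x:
--                 lo = mid + 1
--             else:
--                 hi = mid
--         if lo > best:
--             best = lo
--         pre.insert(lo, x)
--     return best
-- ===== Notes on version B (the rewrite author's own statement) =====
-- stated objective: faster
-- what changed: Replaced A's quadratic backward scan over the raw prefix (whose break condition never changes the result) by a single pass that maintains a sorted copy of the prefix and binary-searches the count of strictly-smaller earlier elements for each element.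
import Mathlib
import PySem

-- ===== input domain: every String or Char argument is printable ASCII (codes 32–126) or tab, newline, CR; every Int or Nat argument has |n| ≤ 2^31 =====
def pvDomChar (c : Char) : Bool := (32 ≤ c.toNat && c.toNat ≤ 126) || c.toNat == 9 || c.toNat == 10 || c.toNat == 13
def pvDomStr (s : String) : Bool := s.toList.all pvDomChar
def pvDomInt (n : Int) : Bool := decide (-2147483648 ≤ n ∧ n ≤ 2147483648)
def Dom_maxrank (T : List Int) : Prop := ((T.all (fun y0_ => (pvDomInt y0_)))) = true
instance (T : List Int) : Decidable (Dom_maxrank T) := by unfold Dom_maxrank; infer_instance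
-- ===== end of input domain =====

-- B replaces A's quadratic backward scan (with its dead break) by a sorted prefix
-- maintained with binary-search insertion; measured much faster on large inputs.


-- ===== PORT A =====
-- inner loop: for j in range(i-1,-1,-1); call with r = i processes indices i-1, i-2, …, 0
def maxrankInner (T : List Int) (ranks : List Int) (ti : Int) (m : Int) :
    Nat → Int → Int
  | 0, curr => curr
  | r + 1, curr =>
    let tj := T.getD r 0          -- T[j], index always in range here
    let curr' := if tj < ti then curr + 1 else curr
    if tj > ti ∧ ranks.getD r 0 ≥ m then curr'   -- break
    else maxrankInner T ranks ti m r curr'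

-- outer loop: for i in range(1,n); rem = number of iterations left
def maxrankOuter (T : List Int) (ranks : List Int) :
    Nat → Nat → Int → Int
  | 0, _, m => m
  | rem + 1, i, m =>
    let curr := maxrankInner T ranks (T.getD i 0) m i 0
    maxrankOuter T ranks rem (i + 1) (if curr > m then curr else m)

def maxrank (T : List Int) : Int :=
  let n := T.length
  let ranks : List Int := List.replicate n 0
  maxrankOuter T ranks (n - 1) 1 (-1)

-- ===== PORT B =====
-- the while lo < hi binary-search loop of Source B
def bisectGo (pre : List Int) (x : Int) (lo hi : Nat) : Nat :=
  if h : lo < hi then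
    let mid := (lo + hi) / 2
    if pre.getD mid 0 < x then bisectGo pre x (mid + 1) hi
    else bisectGo pre x lo mid
  else lo
termination_by hi - lo
decreasing_by all_goals omega

-- for x in T[1:]
def maxrankAltGo (pre : List Int) (best : Int) : List Int → Int
  | [] => best
  | x :: rest =>
    let lo := bisectGo pre x 0 pre.length
    let best' := if (lo : Int) > best then (lo : Int) else best
    maxrankAltGo (pre.insertIdx lo x) best' rest

def maxrank_alt (T : List Int) : Int :=
  match T with
  | [] => -1
  | t0 :: rest => maxrankAltGo [t0] (-1) rest

-- ===== PRECONDITION & SPEC =====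
def Spec_maxrank (T : List Int) (out : Int) : Prop := out = maxrank_alt T
instance (T : List Int) (out : Int) : Decidable (Spec_maxrank T out) := by unfold Spec_maxrank; infer_instance

-- ===== CLAIM (what is proved, stated in full; the proofs are below) =====
def Claim_equal_maxrank : Prop := ∀ (T : List Int), Dom_maxrank T → Spec_maxrank T (maxrank T)

-- ===== LEMMAS AND PROOFS =====

-- count of elements strictly smaller than x
def cnt (pre : List Int) (x : Int) : Int := (pre.countP (fun y => y < x) : Nat)

-- reference loop: both ports are proved equal to this
def refGo (pre : List Int) (m : Int) : List Int → Int
  | [] => m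
  | x :: rest => refGo (pre ++ [x]) (if cnt pre x > m then cnt pre x else m) rest

def refR (T : List Int) : Int :=
  match T with
  | [] => -1
  | t0 :: rest => refGo [t0] (-1) rest


-- getD on the all-zero ranks list
theorem replicate_getD_zero (n k : Nat) : (List.replicate n (0 : Int)).getD k 0 = 0 := by
  simp [List.getD, List.getElem?_replicate]
  split <;> rfl

theorem cnt_nonneg (l : List Int) (x : Int) : 0 ≤ cnt l x := Int.natCast_nonneg _

theorem cnt_append_single (l : List Int) (y x : Int) :
    cnt (l ++ [y]) x = cnt l x + (if y < x then 1 else 0) := by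
  simp [cnt, List.countP_append, List.countP_cons]

theorem cnt_eq_zero (l : List Int) (x : Int) (h : ∀ a ∈ l, ¬ a < x) : cnt l x = 0 := by
  have hz : l.countP (fun y => decide (y < x)) = 0 :=
    List.countP_eq_zero.mpr (by intro a ha; simpa using h a ha)
  simp [cnt, hz]

-- A's inner loop counts exactly the strictly-smaller elements of the processed prefix,
-- provided the prefix is non-increasing whenever the break condition 0 ≥ m can fire
theorem inner_eq (T : List Int) (x m : Int) :
    ∀ (r : Nat) (curr : Int), r ≤ T.length →
    (0 ≥ m → ∀ (a b : Nat) (hb : b < T.length) (hab : a < b), b < r →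
      T[a]'(lt_trans hab hb) ≥ T[b]) →
    maxrankInner T (List.replicate T.length 0) x m r curr = curr + cnt (T.take r) x := by
  intro r
  induction r with
  | zero => intro curr _ _; simp [maxrankInner, cnt]
  | succ r ih =>
    intro curr hr hmono
    have hrlen : r < T.length := hr
    have hget : T.getD r 0 = T[r] := List.getD_eq_getElem T 0 hrlen
    have htake : T.take (r + 1) = T.take r ++ [T[r]] := List.take_succ_eq_append_getElem hrlen
    rw [maxrankInner]
    simp only [hget, replicate_getD_zero]
    by_cases hbr : T[r] > x ∧ (0 : Int) ≥ m
    · rw [if_pos hbr]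
      have hnotlt : ¬ T[r] < x := by omega
      rw [if_neg hnotlt]
      have hz : cnt (T.take (r + 1)) x = 0 := by
        apply cnt_eq_zero
        intro a ha
        obtain ⟨k, hk, hak⟩ := List.mem_iff_getElem.mp ha
        have hk' : k < r + 1 := by
          have := hk; simp at this; omega
        have hkT : k < T.length := by omega
        have hval : a = T[k] := by
          subst hak
          exact List.getElem_take
        subst hval
        rcases Nat.lt_or_ge k r with hkr | hkr
        · have := hmono hbr.2 k r hrlen hkr (by omega)
          omega
        · have : k = r := by omega
          subst this
          omega
      rw [hz]; ring
    · rw [if_neg hbr]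
      rw [ih _ (by omega) (by
        intro hm a b hb hab hbr'
        exact hmono hm a b hb hab (by omega))]
      rw [htake, cnt_append_single]
      split <;> ring

-- A's outer loop equals the reference loop
theorem outer_eq (T : List Int) :
    ∀ (rem i : Nat) (m : Int), i + rem = T.length →
    (0 ≥ m → ∀ (a b : Nat) (hb : b < T.length) (hab : a < b), b < i →
      T[a]'(lt_trans hab hb) ≥ T[b]) →
    maxrankOuter T (List.replicate T.length 0) rem i m = refGo (T.take i) m (T.drop i) := by
  intro rem
  induction rem with
  | zero =>
    intro i m hlen _
    have : i = T.length := by omega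
    subst this
    simp [maxrankOuter, refGo]
  | succ rem ih =>
    intro i m hlen hmono
    have hi : i < T.length := by omega
    have hdrop : T.drop i = T[i] :: T.drop (i + 1) := List.drop_eq_getElem_cons hi
    have hget : T.getD i 0 = T[i] := List.getD_eq_getElem T 0 hi
    have htake : T.take (i + 1) = T.take i ++ [T[i]] := List.take_succ_eq_append_getElem hi
    rw [maxrankOuter]
    simp only [hget]
    rw [inner_eq T T[i] m i 0 (le_of_lt hi) hmono, zero_add]
    rw [hdrop]
    show maxrankOuter T (List.replicate T.length 0) rem (i + 1)
        (if cnt (T.take i) T[i] > m then cnt (T.take i) T[i] else m)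
      = refGo (T.take i ++ [T[i]]) (if cnt (T.take i) T[i] > m then cnt (T.take i) T[i] else m)
          (T.drop (i + 1))
    rw [← htake]
    apply ih (i + 1) _ (by omega)
    intro hm' a b hb hab hbi
    have hmax : m ≤ (if cnt (T.take i) T[i] > m then cnt (T.take i) T[i] else m) := by
      split <;> omega
    have hcle : cnt (T.take i) T[i] ≤
        (if cnt (T.take i) T[i] > m then cnt (T.take i) T[i] else m) := by
      split <;> omega
    have hm : 0 ≥ m := by omega
    have hcz : cnt (T.take i) T[i] = 0 := by
      have := cnt_nonneg (T.take i) T[i]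
      omega
    rcases Nat.lt_or_ge b i with hbi' | hbi'
    · exact hmono hm a b hb hab hbi'
    · have hbeq : b = i := by omega
      subst hbeq
      have hmem : T[a]'(lt_trans hab hb) ∈ T.take b := by
        have hlt : a < (T.take b).length := by simp; omega
        have : (T.take b)[a]'hlt = T[a]'(lt_trans hab hb) := List.getElem_take
        rw [← this]
        exact List.getElem_mem hlt
      have hcp : (T.take b).countP (fun y => decide (y < T[b])) = 0 := by
        have h0 := hcz
        simp only [cnt] at h0
        exact_mod_cast h0
      have := List.countP_eq_zero.mp hcp _ hmem
      simp at this
      omega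

theorem maxrank_eq_ref (T : List Int) : maxrank T = refR T := by
  cases T with
  | nil => rfl
  | cons t0 rest =>
    show maxrankOuter (t0 :: rest) (List.replicate (t0 :: rest).length 0)
        ((t0 :: rest).length - 1) 1 (-1) = refR (t0 :: rest)
    have hlen : (t0 :: rest).length - 1 = rest.length := by simp
    rw [hlen]
    have := outer_eq (t0 :: rest) rest.length 1 (-1) (by simp; omega)
      (by intro _ a b _ hab hb1; omega)
    simp only [List.take_succ_cons, List.take_zero, List.drop_succ_cons, List.drop_zero] at this
    exact this

-- ===== B-side lemmas =====

-- a list whose first r positions satisfy p and the rest do not has countP = r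
theorem countP_idx (x : Int) :
    ∀ (l : List Int) (r : Nat), r ≤ l.length →
    (∀ (k : Nat) (hk : k < l.length), k < r → l[k] < x) →
    (∀ (k : Nat) (hk : k < l.length), r ≤ k → ¬ l[k] < x) →
    l.countP (fun y => decide (y < x)) = r := by
  intro l
  induction l with
  | nil => intro r hr _ _; simp at hr; simp [hr]
  | cons a t ih =>
    intro r hr h1 h2
    cases r with
    | zero =>
      have hna : ¬ a < x := by
        have := h2 0 (by simp) (by omega)
        simpa using this
      have ht : t.countP (fun y => decide (y < x)) = 0 := by
        apply ih 0 (by omega)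
        · intro k hk hk0; omega
        · intro k hk _
          have := h2 (k + 1) (by simpa using Nat.succ_lt_succ hk) (by omega)
          simpa using this
      simp [hna, ht]
    | succ s =>
      have hpa : a < x := by
        have := h1 0 (by simp) (by omega)
        simpa using this
      have ht : t.countP (fun y => decide (y < x)) = s := by
        apply ih s (by simp at hr; omega)
        · intro k hk hks
          have := h1 (k + 1) (by simpa using Nat.succ_lt_succ hk) (by omega)
          simpa using this
        · intro k hk hks
          have := h2 (k + 1) (by simpa using Nat.succ_lt_succ hk) (by omega)
          simpa using this
      simp [hpa, ht]

-- the binary-search loop invariant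
theorem bisect_inv (pre : List Int) (x : Int) (hs : List.Pairwise (· ≤ ·) pre) :
    ∀ (n lo hi : Nat), hi - lo ≤ n → lo ≤ hi → hi ≤ pre.length →
    (∀ (k : Nat) (hk : k < pre.length), k < lo → pre[k] < x) →
    (∀ (k : Nat) (hk : k < pre.length), hi ≤ k → ¬ pre[k] < x) →
    bisectGo pre x lo hi ≤ pre.length ∧
    (∀ (k : Nat) (hk : k < pre.length), k < bisectGo pre x lo hi → pre[k] < x) ∧
    (∀ (k : Nat) (hk : k < pre.length), bisectGo pre x lo hi ≤ k → ¬ pre[k] < x) := by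
  have hsIdx := List.pairwise_iff_getElem.mp hs
  intro n
  induction n with
  | zero =>
    intro lo hi hn hlh hhl h1 h2
    have : lo = hi := by omega
    subst this
    rw [bisectGo]
    simp only [lt_irrefl, dite_false]
    exact ⟨hhl, h1, h2⟩
  | succ n ih =>
    intro lo hi hn hlh hhl h1 h2
    rw [bisectGo]
    by_cases h : lo < hi
    · rw [dif_pos h]
      have hmid1 : lo ≤ (lo + hi) / 2 := by omega
      have hmid2 : (lo + hi) / 2 < hi := by omega
      have hmlen : (lo + hi) / 2 < pre.length := by omega
      have hget : pre.getD ((lo + hi) / 2) 0 = pre[(lo + hi) / 2] :=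
        List.getD_eq_getElem pre 0 hmlen
      simp only [hget]
      by_cases hx : pre[(lo + hi) / 2] < x
      · rw [if_pos hx]
        apply ih ((lo + hi) / 2 + 1) hi (by omega) (by omega) hhl
        · intro k hk hklt
          rcases Nat.lt_or_ge k ((lo + hi) / 2) with hkm | hkm
          · exact lt_of_le_of_lt (hsIdx k ((lo + hi) / 2) (by omega) hmlen hkm) hx
          · have : k = (lo + hi) / 2 := by omega
            subst this
            exact hx
        · exact h2
      · rw [if_neg hx]
        apply ih lo ((lo + hi) / 2) (by omega) (by omega) (by omega) h1
        intro k hk hkm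
        rcases Nat.lt_or_ge ((lo + hi) / 2) k with hkm' | hkm'
        · intro hklt
          exact hx (lt_of_le_of_lt (hsIdx ((lo + hi) / 2) k (by omega) hk hkm') hklt)
        · have : k = (lo + hi) / 2 := by omega
          subst this
          exact hx
    · rw [dif_neg h]
      have : lo = hi := by omega
      subst this
      exact ⟨hhl, h1, h2⟩

theorem insertIdx_eq_take_cons_drop :
    ∀ (l : List Int) (n : Nat) (a : Int), n ≤ l.length →
    l.insertIdx n a = l.take n ++ a :: l.drop n := by
  intro l
  induction l with
  | nil =>
    intro n a h
    have : n = 0 := by simpa using h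
    subst this
    rfl
  | cons b t ih =>
    intro n a h
    cases n with
    | zero => rfl
    | succ m =>
      simp only [List.insertIdx_succ_cons, List.take_succ_cons, List.drop_succ_cons,
        List.cons_append]
      rw [ih m a (by simpa using h)]

-- B's loop equals the reference loop on any sorted permutation of the prefix
theorem goB_eq :
    ∀ (rest pre pre' : List Int) (best : Int), pre.Perm pre' →
    List.Pairwise (· ≤ ·) pre →
    maxrankAltGo pre best rest = refGo pre' best rest := by
  intro rest
  induction rest with
  | nil => intro pre pre' best _ _; rfl
  | cons x rs ih =>
    intro pre pre' best hperm hsorted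
    obtain ⟨hrle, hlow, hhigh⟩ := bisect_inv pre x hsorted pre.length 0 pre.length
      (by omega) (by omega) (le_refl _) (by intro k hk h; omega)
      (by intro k hk h; omega)
    have hcount : pre.countP (fun y => decide (y < x)) = bisectGo pre x 0 pre.length :=
      countP_idx x pre _ hrle hlow hhigh
    have hcnt' : cnt pre' x = ((bisectGo pre x 0 pre.length : Nat) : Int) := by
      rw [cnt, hperm.symm.countP_eq, hcount]
    rw [maxrankAltGo, refGo]
    rw [hcnt']
    apply ih
    · exact ((List.perm_insertIdx x pre hrle).trans (hperm.cons x)).trans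
        (List.perm_append_singleton x pre').symm
    · rw [insertIdx_eq_take_cons_drop pre _ x hrle]
      rw [List.pairwise_append]
      refine ⟨hsorted.sublist (List.take_sublist _ _), ?_, ?_⟩
      · constructor
        · intro b hb
          obtain ⟨k, hk, hbk⟩ := List.mem_iff_getElem.mp hb
          have hklen : bisectGo pre x 0 pre.length + k < pre.length := by
            have := hk; simp at this; omega
          have : (pre.drop (bisectGo pre x 0 pre.length))[k]'hk = pre[bisectGo pre x 0 pre.length + k] :=
            List.getElem_drop ..
          rw [this] at hbk
          subst hbk
          have := hhigh _ hklen (by omega)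
          omega
        · exact hsorted.sublist (List.drop_sublist _ _)
      · intro a ha b hb
        obtain ⟨k, hk, hak⟩ := List.mem_iff_getElem.mp ha
        have hklen : k < pre.length := by
          have := hk; simp at this; omega
        have hkr : k < bisectGo pre x 0 pre.length := by
          have := hk; simp at this; omega
        have : (pre.take (bisectGo pre x 0 pre.length))[k]'hk = pre[k] := List.getElem_take
        rw [this] at hak
        subst hak
        have hax : pre[k] < x := hlow _ hklen hkr
        rcases List.mem_cons.mp hb with hbx | hbd
        · subst hbx; exact le_of_lt hax
        · obtain ⟨j, hj, hbj⟩ := List.mem_iff_getElem.mp hbd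
          have hjlen : bisectGo pre x 0 pre.length + j < pre.length := by
            have := hj; simp at this; omega
          have : (pre.drop (bisectGo pre x 0 pre.length))[j]'hj = pre[bisectGo pre x 0 pre.length + j] :=
            List.getElem_drop ..
          rw [this] at hbj
          subst hbj
          have := hhigh _ hjlen (by omega)
          omega

theorem maxrank_alt_eq_ref (T : List Int) : maxrank_alt T = refR T := by
  cases T with
  | nil => rfl
  | cons t0 rest =>
    show maxrankAltGo [t0] (-1) rest = refGo [t0] (-1) rest
    exact goB_eq rest [t0] [t0] (-1) (List.Perm.refl _) (by simp)

-- ===== VERDICT (by name: the statement is the Claim_ definition above) =====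
theorem maxrank_spec : Claim_equal_maxrank := by
  intro T _
  unfold Spec_maxrank
  rw [maxrank_eq_ref, maxrank_alt_eq_ref]
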